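-- pv_equiv track=rewrite | github.com/JonesFerdin/Coding-Problems | zoho func.py | zoho
-- ===== SOURCE A (Python) =====
-- def zoho(a):
--     a=list(a)
--     c=[]
--     for i in a:
--      if i.isalpha():
--         c.append(i)
--     c.sort()
--     x=0
--     for i in range(0,len(a)):
--         if a[i].isalpha():
--             a[i]=c[x]
--             x+=1
--     return ''.join(a)
-- ===== SOURCE B (Python) =====
-- def zoho(a):
--     # counting sort over the ASCII letter alphabet instead of a comparison sort
--     counts = {}
--     for ch in a:
--         if ch.isalpha():
--             counts[ch] = counts.get(ch, 0) + 1
--     letters = []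
--     for code in range(65, 123):
--         letters += [chr(code)] * counts.get(chr(code), 0)
--     it = iter(letters)
--     return ''.join(next(it) if ch.isalpha() else ch for ch in a)
-- ===== Notes on version B (the rewrite author's own statement) =====
-- stated objective: alternative
-- what changed: Replaces A's comparison sort of the extracted letters by a counting sort: one pass builds per-letter counts, the sorted letter sequence is emitted by sweeping the 52-letter ASCII alphabet, and a single generator pass re-inserts letters at alphabetic positions.
import Mathlib
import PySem

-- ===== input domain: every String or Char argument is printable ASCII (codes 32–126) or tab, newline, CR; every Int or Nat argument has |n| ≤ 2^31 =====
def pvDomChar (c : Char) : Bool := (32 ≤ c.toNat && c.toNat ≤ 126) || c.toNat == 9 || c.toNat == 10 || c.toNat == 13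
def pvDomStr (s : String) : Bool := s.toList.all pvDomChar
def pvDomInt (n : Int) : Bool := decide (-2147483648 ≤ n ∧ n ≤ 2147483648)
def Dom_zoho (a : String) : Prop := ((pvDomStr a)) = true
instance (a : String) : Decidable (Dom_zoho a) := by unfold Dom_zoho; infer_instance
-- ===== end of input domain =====

-- B replaces A's comparison sort of the letters by a counting sort over the ASCII letter alphabet (alternative algorithm; non-letter positions stay fixed in both).

-- ===== PORT A =====
-- the second loop of A: walk the string, replacing each alphabetic position by the next sorted letter
def zohoFillA : List Char → List Char → List Char
  | [], _ => []
  | i :: rest, c =>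
    if PySem.Chars.isalpha i then c.headD i :: zohoFillA rest c.tail
    else i :: zohoFillA rest c

def zoho (a : String) : String :=
  let l := a.toList
  let c := l.filter (fun i => PySem.Chars.isalpha i)
  let cs := PySem.List.sorted c (fun x => x)
  String.mk (zohoFillA l cs)

-- ===== PORT B =====
-- B's final generator expression: emit next(it) at alphabetic positions, the original char elsewhere
def zohoFillB : List Char → List Char → List Char
  | [], _ => []
  | ch :: rest, it =>
    if PySem.Chars.isalpha ch then it.headD ch :: zohoFillB rest it.tail
    else ch :: zohoFillB rest it

def zoho_alt (a : String) : String :=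
  let counts := a.toList.foldl
      (fun d ch => if PySem.Chars.isalpha ch then d.insert ch (d.getD ch 0 + 1) else d)
      (PySem.Dict.empty : PySem.Dict Char Int)
  let letters := (PySem.List.pyRange 65 123 1).foldl
      (fun acc code => acc ++ List.replicate (counts.getD (Char.ofNat code.toNat) 0).toNat (Char.ofNat code.toNat)) []
  String.mk (zohoFillB a.toList letters)

-- ===== PRECONDITION & SPEC =====
def Spec_zoho (a : String) (out : String) : Prop := out = zoho_alt a
instance (a : String) (out : String) : Decidable (Spec_zoho a out) := by unfold Spec_zoho; infer_instance

-- ===== CLAIM (what is proved, stated in full; the proofs are below) =====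
def Claim_equal_zoho : Prop := ∀ (a : String), Dom_zoho a → Spec_zoho a (zoho a)

-- ===== LEMMAS AND PROOFS =====

theorem fillB_eq_fillA (l c : List Char) : zohoFillB l c = zohoFillA l c := by
  induction l generalizing c with
  | nil => rfl
  | cons x rest ih => simp [zohoFillA, zohoFillB, ih]

theorem char_le_iff (a b : Char) : a ≤ b ↔ a.toNat ≤ b.toNat := by
  rw [Char.le_def]; exact UInt32.le_iff_toNat_le

theorem toNat_ofNat_of_lt {k : Nat} (h : k < 1000) : (Char.ofNat k).toNat = k := by
  rw [Char.toNat_ofNat, if_pos]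
  exact Or.inl (by omega)

theorem isalpha_range {x : Char} (h : PySem.Chars.isalpha x = true) :
    65 ≤ x.toNat ∧ x.toNat ≤ 122 := by
  simp [PySem.Chars.isalpha, PySem.Chars.isupper, PySem.Chars.islower] at h
  rcases h with ⟨h1, h2⟩ | ⟨h1, h2⟩ <;>
    (rw [char_le_iff] at h1 h2; simp at h1 h2; omega)

theorem cntFlat (f : List Char) (x : Char) : ∀ ks : List Int,
    (ks.map (fun k => Char.ofNat k.toNat)).Nodup →
    (ks.flatMap (fun k => List.replicate (f.count (Char.ofNat k.toNat)) (Char.ofNat k.toNat))).count x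
      = if x ∈ ks.map (fun k => Char.ofNat k.toNat) then f.count x else 0 := by
  intro ks
  induction ks with
  | nil => simp
  | cons k ks ih =>
    intro hnd
    rw [List.map_cons, List.nodup_cons] at hnd
    rw [List.flatMap_cons, List.count_append, List.count_replicate, ih hnd.2]
    by_cases hx : Char.ofNat k.toNat = x
    · subst hx
      simp [hnd.1]
    · simp [hx, Ne.symm hx]

theorem pwFlat (n : Char → Nat) : ∀ ks : List Int, ks.Pairwise (· < ·) →
    (∀ k ∈ ks, 0 ≤ k ∧ k < 1000) →
    (ks.flatMap (fun k => List.replicate (n (Char.ofNat k.toNat)) (Char.ofNat k.toNat))).Pairwise (· ≤ ·) := by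
  intro ks
  induction ks with
  | nil => simp
  | cons k ks ih =>
    intro hpw hb
    rw [List.pairwise_cons] at hpw
    rw [List.flatMap_cons, List.pairwise_append]
    refine ⟨?_, ih hpw.2 (fun k' hk' => hb k' (by simp [hk'])), ?_⟩
    · rw [List.pairwise_replicate]; exact Or.inr le_rfl
    · intro a ha b hb'
      rw [List.mem_replicate] at ha
      rw [List.mem_flatMap] at hb'
      rcases hb' with ⟨k', hk', hbk'⟩
      rw [List.mem_replicate] at hbk'
      have hkk' : k < k' := hpw.1 k' hk'
      have h1 := hb k (by simp)
      have h2 := hb k' (by simp [hk'])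
      rw [ha.2, hbk'.2, char_le_iff,
          toNat_ofNat_of_lt (by omega : k.toNat < 1000),
          toNat_ofNat_of_lt (by omega : k'.toNat < 1000)]
      omega

theorem mem_codes_iff (x : Char) :
    x ∈ (PySem.List.pyRange 65 123 1).map (fun k => Char.ofNat k.toNat) ↔
      65 ≤ x.toNat ∧ x.toNat ≤ 122 := by
  have hr : PySem.List.pyRange 65 123 1 = (List.range' 65 58).map (Int.ofNat) := by decide
  rw [hr]
  constructor
  · intro hx
    rw [List.mem_map] at hx
    rcases hx with ⟨k, hk, hkx⟩
    rw [List.mem_map] at hk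
    rcases hk with ⟨m, hm, hmk⟩
    rw [List.mem_range'] at hm
    obtain ⟨i, hi, rfl⟩ := hm
    subst hmk
    have h : (Int.ofNat (65 + 1 * i)).toNat = 65 + 1 * i := rfl
    rw [h] at hkx
    rw [← hkx, toNat_ofNat_of_lt (by omega)]
    omega
  · intro ⟨h1, h2⟩
    rw [List.mem_map]
    refine ⟨Int.ofNat x.toNat, ?_, ?_⟩
    · rw [List.mem_map]
      refine ⟨x.toNat, ?_, rfl⟩
      rw [List.mem_range']
      exact ⟨x.toNat - 65, by omega, by omega⟩
    · show Char.ofNat ((Int.ofNat x.toNat).toNat) = x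
      have h : (Int.ofNat x.toNat).toNat = x.toNat := rfl
      rw [h, Char.ofNat_toNat]

-- the heart of the proof: the counting-sort output names the sorted order of the letters
theorem letters_eq_sorted (l : List Char) :
    PySem.List.sorted (l.filter (fun i => PySem.Chars.isalpha i)) (fun x => x)
      = (PySem.List.pyRange 65 123 1).flatMap
          (fun k => List.replicate ((l.filter (fun i => PySem.Chars.isalpha i)).count (Char.ofNat k.toNat))
                                   (Char.ofNat k.toNat)) := by
  set f := l.filter (fun i => PySem.Chars.isalpha i) with hf
  apply PySem.List.sorted_id_eq_of_perm_of_pairwise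
  · rw [List.perm_iff_count]
    intro x
    rw [cntFlat f x _ (by decide)]
    by_cases hx : x ∈ (PySem.List.pyRange 65 123 1).map (fun k => Char.ofNat k.toNat)
    · rw [if_pos hx]
    · rw [if_neg hx, eq_comm, List.count_eq_zero]
      intro hxf
      have ha : PySem.Chars.isalpha x = true := (List.mem_filter.mp hxf).2
      exact hx ((mem_codes_iff x).mpr (isalpha_range ha))
  · exact pwFlat (fun c => f.count c) _ (by decide) (by decide)

-- ===== VERDICT (by name: the statement is the Claim_ definition above) =====
theorem counts_eq (l : List Char) :
    l.foldl (fun d ch => if PySem.Chars.isalpha ch then d.insert ch (d.getD ch 0 + 1) else d)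
        (PySem.Dict.empty : PySem.Dict Char Int)
      = PySem.Dict.counter (l.filter (fun i => PySem.Chars.isalpha i)) := by
  rw [← PySem.Dict.foldl_insert_getD_add_one_eq_counter, List.foldl_filter]

theorem letters_full (l : List Char) :
    ((PySem.List.pyRange 65 123 1).foldl
        (fun acc code => acc ++ List.replicate
          (((l.foldl (fun d ch => if PySem.Chars.isalpha ch then d.insert ch (d.getD ch 0 + 1) else d)
              (PySem.Dict.empty : PySem.Dict Char Int)).getD (Char.ofNat code.toNat) 0).toNat)
          (Char.ofNat code.toNat)) [])
      = PySem.List.sorted (l.filter (fun i => PySem.Chars.isalpha i)) (fun x => x) := by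
  simp only [counts_eq, PySem.Dict.getD_counter, Int.toNat_natCast]
  rw [PySem.List.foldl_append_eq_flatMap, List.nil_append, letters_eq_sorted]

-- ===== VERDICT (by name: the statement is the Claim_ definition above) =====
theorem zoho_spec : Claim_equal_zoho := by
  intro a _
  show zoho a = zoho_alt a
  simp only [zoho, zoho_alt]
  rw [fillB_eq_fillA, letters_full]
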